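-- pv_equiv track=rewrite | github.com/tzhuhua/EOL_Dev | polar_show.py | color_classify
-- ===== SOURCE A (Python) =====
-- def color_classify(rcsIndex, rcsNum, xPositionVal, yPositionVal):
--     colorXResult = []
--     colorYResult = []
--     singleColorX = []
--     singleColorY = []
--     if rcsNum < 4:
--         for i in range(rcsNum):
--             singleColorX.append(xPositionVal[rcsIndex[i]])
--             singleColorY.append(yPositionVal[rcsIndex[i]])
--             colorXResult.append(singleColorX)
--             colorYResult.append(singleColorY)
--             singleColorX = []
--             singleColorY = []
--         return colorXResult, colorYResult
--     else:
--         averageColor = rcsNum // 4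
--         #第一个色度
--         for i in range(averageColor):
--             singleColorX.append(xPositionVal[rcsIndex[i]])
--             singleColorY.append(yPositionVal[rcsIndex[i]])
--         colorXResult.append(singleColorX)
--         colorYResult.append(singleColorY)
--         singleColorX = []
--         singleColorY = []
--         # 第二个色度
--         for i in range(averageColor):
--             singleColorX.append(xPositionVal[rcsIndex[i + averageColor]])
--             singleColorY.append(yPositionVal[rcsIndex[i + averageColor]])
--         colorXResult.append(singleColorX)
--         colorYResult.append(singleColorY)
--         singleColorX = []
--         singleColorY = []
--         # 第三个色度
--         for i in range(averageColor):
--             singleColorX.append(xPositionVal[rcsIndex[i + averageColor * 2]])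
--             singleColorY.append(yPositionVal[rcsIndex[i + averageColor * 2]])
--         colorXResult.append(singleColorX)
--         colorYResult.append(singleColorY)
--         singleColorX = []
--         singleColorY = []
--         #第四个色度
--         for i in range(rcsNum - averageColor * 3):
--             singleColorX.append(xPositionVal[rcsIndex[i + averageColor * 3]])
--             singleColorY.append(yPositionVal[rcsIndex[i + averageColor * 3]])
--         colorXResult.append(singleColorX)
--         colorYResult.append(singleColorY)
--         singleColorX = []
--         singleColorY = []
--         return colorXResult, colorYResult
-- ===== SOURCE B (Python) =====
-- def color_classify(rcsIndex, rcsNum, xPositionVal, yPositionVal):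
--     if rcsNum < 4:
--         ngroups = rcsNum
--         def group_of(i):
--             return i
--     else:
--         avg = rcsNum // 4
--         ngroups = 4
--         def group_of(i):
--             return min(i // avg, 3)
--     colorXResult = [[] for _ in range(ngroups)]
--     colorYResult = [[] for _ in range(ngroups)]
--     for i in range(rcsNum):
--         g = group_of(i)
--         colorXResult[g].append(xPositionVal[rcsIndex[i]])
--         colorYResult[g].append(yPositionVal[rcsIndex[i]])
--     return colorXResult, colorYResult
-- ===== Notes on version B (the rewrite author's own statement) =====
-- stated objective: alternative
-- what changed: Replaces A's gather-by-segments (four hand-unrolled loops, each slicing the next contiguous run of indices) with a single scatter pass: each position's group id is computed in closed form (min(i//avg,3), or i itself when rcsNum<4) and the value is appended into that pre-allocated bucket.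
import Mathlib
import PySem

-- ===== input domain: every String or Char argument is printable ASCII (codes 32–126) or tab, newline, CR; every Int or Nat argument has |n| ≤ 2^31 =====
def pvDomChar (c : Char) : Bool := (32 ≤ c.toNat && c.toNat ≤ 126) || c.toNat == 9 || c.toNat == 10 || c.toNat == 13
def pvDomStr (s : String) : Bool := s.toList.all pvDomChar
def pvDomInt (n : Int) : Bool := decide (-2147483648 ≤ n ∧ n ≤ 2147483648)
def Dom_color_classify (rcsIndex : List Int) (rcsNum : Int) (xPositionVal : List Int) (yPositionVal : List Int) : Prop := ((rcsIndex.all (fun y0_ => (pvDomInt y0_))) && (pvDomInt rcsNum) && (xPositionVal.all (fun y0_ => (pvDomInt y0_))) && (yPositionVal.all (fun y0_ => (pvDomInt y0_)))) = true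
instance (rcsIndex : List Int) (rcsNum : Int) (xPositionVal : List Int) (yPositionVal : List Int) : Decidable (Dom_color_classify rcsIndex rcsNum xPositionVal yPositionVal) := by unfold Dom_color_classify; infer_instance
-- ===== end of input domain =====

-- B replaces A's gather-by-segments (four unrolled slicing loops) by one scatter pass: each
-- position's group id is computed in closed form and the value appended into that bucket
-- (objective: alternative).  Indexing ported with PySem.List.pyGetD (default 0), exact on Pre_
-- (Python raises IndexError outside, excluded by Pre_).

-- ===== PORT A =====
def color_classify (rcsIndex : List Int) (rcsNum : Int) (xPositionVal : List Int) (yPositionVal : List Int) : List (List Int) × List (List Int) :=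
  if rcsNum < 4 then
    -- for i in range(rcsNum): append singleton groups, resetting singleColorX/Y each iteration
    let st := (PySem.List.pyRange 0 rcsNum 1).foldl
      (fun (st : List (List Int) × List (List Int) × List Int × List Int) i =>
        let sx := st.2.2.1 ++ [PySem.List.pyGetD xPositionVal (PySem.List.pyGetD rcsIndex i 0) 0]
        let sy := st.2.2.2 ++ [PySem.List.pyGetD yPositionVal (PySem.List.pyGetD rcsIndex i 0) 0]
        (st.1 ++ [sx], st.2.1 ++ [sy], ([] : List Int), ([] : List Int)))
      ([], [], [], [])
    (st.1, st.2.1)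
  else
    let averageColor := PySem.Int.floordiv rcsNum 4
    -- first group
    let g1 := (PySem.List.pyRange 0 averageColor 1).foldl
      (fun (p : List Int × List Int) i =>
        (p.1 ++ [PySem.List.pyGetD xPositionVal (PySem.List.pyGetD rcsIndex i 0) 0],
         p.2 ++ [PySem.List.pyGetD yPositionVal (PySem.List.pyGetD rcsIndex i 0) 0])) ([], [])
    -- second group
    let g2 := (PySem.List.pyRange 0 averageColor 1).foldl
      (fun (p : List Int × List Int) i =>
        (p.1 ++ [PySem.List.pyGetD xPositionVal (PySem.List.pyGetD rcsIndex (i + averageColor) 0) 0],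
         p.2 ++ [PySem.List.pyGetD yPositionVal (PySem.List.pyGetD rcsIndex (i + averageColor) 0) 0])) ([], [])
    -- third group
    let g3 := (PySem.List.pyRange 0 averageColor 1).foldl
      (fun (p : List Int × List Int) i =>
        (p.1 ++ [PySem.List.pyGetD xPositionVal (PySem.List.pyGetD rcsIndex (i + averageColor * 2) 0) 0],
         p.2 ++ [PySem.List.pyGetD yPositionVal (PySem.List.pyGetD rcsIndex (i + averageColor * 2) 0) 0])) ([], [])
    -- fourth group
    let g4 := (PySem.List.pyRange 0 (rcsNum - averageColor * 3) 1).foldl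
      (fun (p : List Int × List Int) i =>
        (p.1 ++ [PySem.List.pyGetD xPositionVal (PySem.List.pyGetD rcsIndex (i + averageColor * 3) 0) 0],
         p.2 ++ [PySem.List.pyGetD yPositionVal (PySem.List.pyGetD rcsIndex (i + averageColor * 3) 0) 0])) ([], [])
    ([] ++ [g1.1] ++ [g2.1] ++ [g3.1] ++ [g4.1], [] ++ [g1.2] ++ [g2.2] ++ [g3.2] ++ [g4.2])

-- ===== PORT B =====
def color_classify_alt (rcsIndex : List Int) (rcsNum : Int) (xPositionVal : List Int) (yPositionVal : List Int) : List (List Int) × List (List Int) :=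
  -- group_of: closed-form group id of position i; ngroups: number of pre-allocated buckets
  let group_of : Int → Nat :=
    if rcsNum < 4 then (fun i => i.toNat)
    else (fun i => min (PySem.Int.floordiv i (PySem.Int.floordiv rcsNum 4)).toNat 3)
  let ngroups : Nat := if rcsNum < 4 then rcsNum.toNat else 4
  -- for i in range(rcsNum): colorXResult[g].append(...); colorYResult[g].append(...)
  (PySem.List.pyRange 0 rcsNum 1).foldl
    (fun (st : List (List Int) × List (List Int)) i =>
      let g := group_of i
      (st.1.set g (st.1.getD g [] ++ [PySem.List.pyGetD xPositionVal (PySem.List.pyGetD rcsIndex i 0) 0]),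
       st.2.set g (st.2.getD g [] ++ [PySem.List.pyGetD yPositionVal (PySem.List.pyGetD rcsIndex i 0) 0])))
    (List.replicate ngroups [], List.replicate ngroups [])

-- ===== PRECONDITION & SPEC =====
-- Pre_ excludes exactly the inputs where Python A raises IndexError: rcsNum exceeding len(rcsIndex),
-- or some used entry of rcsIndex out of Python range for xPositionVal/yPositionVal.
def Pre_color_classify (rcsIndex : List Int) (rcsNum : Int) (xPositionVal : List Int) (yPositionVal : List Int) : Prop :=
  rcsNum.toNat ≤ rcsIndex.length ∧
  ∀ j ∈ rcsIndex.take rcsNum.toNat,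
    PySem.Raise.InRange xPositionVal.length j ∧ PySem.Raise.InRange yPositionVal.length j
instance (rcsIndex : List Int) (rcsNum : Int) (xPositionVal : List Int) (yPositionVal : List Int) : Decidable (Pre_color_classify rcsIndex rcsNum xPositionVal yPositionVal) := by unfold Pre_color_classify; infer_instance

def pvWitness_color_classify : List Int × Int × List Int × List Int := ([0, 1, -1, 2, 0], 5, [10, 20, 30], [40, 50, 60])

def Spec_color_classify (rcsIndex : List Int) (rcsNum : Int) (xPositionVal : List Int) (yPositionVal : List Int) (out : List (List Int) × List (List Int)) : Prop := out = color_classify_alt rcsIndex rcsNum xPositionVal yPositionVal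
instance (rcsIndex : List Int) (rcsNum : Int) (xPositionVal : List Int) (yPositionVal : List Int) (out : List (List Int) × List (List Int)) : Decidable (Spec_color_classify rcsIndex rcsNum xPositionVal yPositionVal out) := by unfold Spec_color_classify; infer_instance

-- ===== CLAIM (what is proved, stated in full; the proofs are below) =====
def Claim_equal_color_classify : Prop := ∀ (rcsIndex : List Int) (rcsNum : Int) (xPositionVal : List Int) (yPositionVal : List Int), Dom_color_classify rcsIndex rcsNum xPositionVal yPositionVal → Pre_color_classify rcsIndex rcsNum xPositionVal yPositionVal → Spec_color_classify rcsIndex rcsNum xPositionVal yPositionVal (color_classify rcsIndex rcsNum xPositionVal yPositionVal)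

-- ===== LEMMAS AND PROOFS =====

-- Scatter into a constant bucket: a fold that appends f i into bucket pg i, over a list where
-- pg is constantly k, only extends bucket k by the map of the list.
theorem scatter_const (f : Int → Int) (pg : Int → Nat) (k : Nat) :
    ∀ (l : List Int) (bs : List (List Int)), (∀ i ∈ l, pg i = k) → k < bs.length →
    l.foldl (fun bs i => bs.set (pg i) (bs.getD (pg i) [] ++ [f i])) bs
      = bs.set k (bs.getD k [] ++ l.map f) := by
  intro l
  induction l with
  | nil =>
    intro bs _ hk
    rw [List.foldl_nil, List.map_nil, List.append_nil,
        List.getD_eq_getElem _ _ hk, List.set_getElem_self]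
  | cons i l ih =>
    intro bs hc hk
    have hi : pg i = k := hc i (by simp)
    have hgd : (bs.set k (bs.getD k [] ++ [f i])).getD k [] = bs.getD k [] ++ [f i] := by
      rw [List.getD_eq_getElem _ _ (by simpa using hk), List.getElem_set_self]
    simp only [List.foldl_cons, hi]
    rw [ih _ (fun j hj => hc j (by simp [hj])) (by simpa using hk), hgd,
        List.set_set, List.map_cons, List.append_assoc]
    simp


-- A map over a shifted range is the map of the shifted function over the 0-based range.
theorem map_pyRange_shift (fx : Int → Int) (a b : Int) :
    (PySem.List.pyRange a b 1).map fx
      = (PySem.List.pyRange 0 (b - a) 1).map (fun i => fx (i + a)) := by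
  rw [PySem.List.pyRange_one, PySem.List.pyRange_one, List.map_map, List.map_map]
  simp only [sub_zero]
  exact List.map_congr_left (fun k _ => by simp [add_comm])

-- The scatter fold preserves the number of buckets.
theorem scatter_length (f : Int → Int) (pg : Int → Nat) :
    ∀ (l : List Int) (bs : List (List Int)),
    (l.foldl (fun bs i => bs.set (pg i) (bs.getD (pg i) [] ++ [f i])) bs).length = bs.length := by
  intro l
  induction l with
  | nil => intro bs; rfl
  | cons i l ih => intro bs; rw [List.foldl_cons, ih, List.length_set]

-- The whole scatter pass over range(n) with group id min(i//avg, 3) fills the four buckets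
-- with exactly the four gathered quarter groups.
theorem scatter_quarters (fx : Int → Int) (avg n : Int) (h1 : 1 ≤ avg) (h3 : avg * 3 ≤ n) :
    (PySem.List.pyRange 0 n 1).foldl
      (fun bs i => bs.set (min (PySem.Int.floordiv i avg).toNat 3)
        (bs.getD (min (PySem.Int.floordiv i avg).toNat 3) [] ++ [fx i]))
      [[], [], [], []]
    = [(PySem.List.pyRange 0 avg 1).map fx,
       (PySem.List.pyRange 0 avg 1).map (fun i => fx (i + avg)),
       (PySem.List.pyRange 0 avg 1).map (fun i => fx (i + avg * 2)),
       (PySem.List.pyRange 0 (n - avg * 3) 1).map (fun i => fx (i + avg * 3))] := by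
  rw [PySem.List.pyRange_one_append 0 avg n (by omega) (by omega),
      PySem.List.pyRange_one_append avg (avg * 2) n (by omega) (by omega),
      PySem.List.pyRange_one_append (avg * 2) (avg * 3) n (by omega) (by omega),
      List.foldl_append, List.foldl_append, List.foldl_append]
  rw [scatter_const fx _ 3 _ _ (fun i hi => by
        rw [PySem.List.mem_pyRange_one] at hi
        have h0 : 3 ≤ PySem.Int.floordiv i avg := by
          rw [PySem.Int.le_floordiv_iff_mul_le (by omega)]; omega
        omega) (by rw [scatter_length, scatter_length, scatter_length]; simp)]
  rw [scatter_const fx _ 2 _ _ (fun i hi => by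
        rw [PySem.List.mem_pyRange_one] at hi
        have h0 : PySem.Int.floordiv i avg = 2 := by
          rw [PySem.Int.floordiv_eq_iff_of_pos (by omega)]; constructor <;> omega
        simp [h0]) (by rw [scatter_length, scatter_length]; simp)]
  rw [scatter_const fx _ 1 _ _ (fun i hi => by
        rw [PySem.List.mem_pyRange_one] at hi
        have h0 : PySem.Int.floordiv i avg = 1 := by
          rw [PySem.Int.floordiv_eq_iff_of_pos (by omega)]; constructor <;> omega
        simp [h0]) (by rw [scatter_length]; simp)]
  rw [scatter_const fx _ 0 _ _ (fun i hi => by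
        rw [PySem.List.mem_pyRange_one] at hi
        have h0 : PySem.Int.floordiv i avg = 0 := by
          rw [PySem.Int.floordiv_eq_iff_of_pos (by omega)]; constructor <;> omega
        simp [h0]) (by simp)]
  simp only [List.set, List.getD, List.getElem?_cons_zero, List.getElem?_cons_succ,
    Option.getD_some, List.nil_append]
  rw [map_pyRange_shift fx avg (avg * 2), map_pyRange_shift fx (avg * 2) (avg * 3),
      map_pyRange_shift fx (avg * 3) n,
      show avg * 2 - avg = avg from by ring, show avg * 3 - avg * 2 = avg from by ring]

-- The two ports agree on every input (the equality needs neither Dom nor Pre; Pre only marks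
-- where the Pythons raise).
theorem color_classify_eq_alt (rcsIndex : List Int) (rcsNum : Int) (xPositionVal : List Int) (yPositionVal : List Int) :
    color_classify rcsIndex rcsNum xPositionVal yPositionVal = color_classify_alt rcsIndex rcsNum xPositionVal yPositionVal := by
  by_cases h : rcsNum < 4
  · have h4 : rcsNum ≤ 0 ∨ rcsNum = 1 ∨ rcsNum = 2 ∨ rcsNum = 3 := by omega
    rcases h4 with h0 | rfl | rfl | rfl
    · have hn : rcsNum.toNat = 0 := by omega
      simp [color_classify, color_classify_alt, h, hn, PySem.List.pyRange_one_eq_nil h0]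
    all_goals
      simp [color_classify, color_classify_alt, PySem.List.pyRange, List.range_succ]
  · -- rcsNum ≥ 4: B's scatter fold, split into the four ranges where the group id is constant,
    -- fills bucket k with exactly A's k-th gathered group.
    have hge : 4 ≤ rcsNum := by omega
    have hav : 1 ≤ PySem.Int.floordiv rcsNum 4 := by
      rw [PySem.Int.le_floordiv_iff_mul_le (by norm_num)]; omega
    have hfm := PySem.Int.floordiv_mul_add_mod rcsNum 4
    have hmn : 0 ≤ PySem.Int.mod rcsNum 4 := PySem.Int.mod_nonneg rcsNum (by norm_num)
    set avg := PySem.Int.floordiv rcsNum 4 with havg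
    have h3 : avg * 3 ≤ rcsNum := by omega
    simp only [color_classify, color_classify_alt, if_neg h, ← havg]
    rw [PySem.List.foldl_prod_mk (f := fun (a : List Int) (i : Int) => a ++ [PySem.List.pyGetD xPositionVal (PySem.List.pyGetD rcsIndex i 0) 0]) (g := fun (a : List Int) (i : Int) => a ++ [PySem.List.pyGetD yPositionVal (PySem.List.pyGetD rcsIndex i 0) 0]),
        PySem.List.foldl_prod_mk (f := fun (a : List Int) (i : Int) => a ++ [PySem.List.pyGetD xPositionVal (PySem.List.pyGetD rcsIndex (i + avg) 0) 0]) (g := fun (a : List Int) (i : Int) => a ++ [PySem.List.pyGetD yPositionVal (PySem.List.pyGetD rcsIndex (i + avg) 0) 0]),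
        PySem.List.foldl_prod_mk (f := fun (a : List Int) (i : Int) => a ++ [PySem.List.pyGetD xPositionVal (PySem.List.pyGetD rcsIndex (i + avg * 2) 0) 0]) (g := fun (a : List Int) (i : Int) => a ++ [PySem.List.pyGetD yPositionVal (PySem.List.pyGetD rcsIndex (i + avg * 2) 0) 0]),
        PySem.List.foldl_prod_mk (f := fun (a : List Int) (i : Int) => a ++ [PySem.List.pyGetD xPositionVal (PySem.List.pyGetD rcsIndex (i + avg * 3) 0) 0]) (g := fun (a : List Int) (i : Int) => a ++ [PySem.List.pyGetD yPositionVal (PySem.List.pyGetD rcsIndex (i + avg * 3) 0) 0]),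
        PySem.List.foldl_prod_mk (f := fun (s : List (List Int)) (i : Int) => s.set (min (PySem.Int.floordiv i avg).toNat 3) (s.getD (min (PySem.Int.floordiv i avg).toNat 3) [] ++ [PySem.List.pyGetD xPositionVal (PySem.List.pyGetD rcsIndex i 0) 0])) (g := fun (s : List (List Int)) (i : Int) => s.set (min (PySem.Int.floordiv i avg).toNat 3) (s.getD (min (PySem.Int.floordiv i avg).toNat 3) [] ++ [PySem.List.pyGetD yPositionVal (PySem.List.pyGetD rcsIndex i 0) 0]))]
    simp only [PySem.List.foldl_append_singleton_eq_map, List.nil_append,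
      List.replicate]
    rw [scatter_quarters _ avg rcsNum hav h3, scatter_quarters _ avg rcsNum hav h3]
    simp


-- ===== VERDICT (by name: the statement is the Claim_ definition above) =====
theorem color_classify_spec : Claim_equal_color_classify := by
  intro rcsIndex rcsNum x y _ _
  unfold Spec_color_classify
  exact color_classify_eq_alt rcsIndex rcsNum x y
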